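-- pv_equiv track=rewrite | github.com/ljbkusters/advent-of-code-2022 | day-3/rucksack.py | __hash_rucksack_contents_by_item
-- ===== SOURCE A (Python) =====
-- def __hash_rucksack_contents_by_item(rucksack_strings: tuple[str]) -> dict[str, list[int]]:
--     rucksack_mapping = {}
--     for i, contents in enumerate(rucksack_strings):
--         for char in contents:
--             if char not in rucksack_mapping:
--                 rucksack_mapping[char] = set()
--             rucksack_mapping[char].add(i)
--     return rucksack_mapping
-- ===== SOURCE B (Python) =====
-- def __hash_rucksack_contents_by_item(rucksack_strings):
--     joined = "".join(rucksack_strings)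
--     return {c: {i for i, s in enumerate(rucksack_strings) if c in s}
--             for c in dict.fromkeys(joined)}
-- ===== Notes on version B (the rewrite author's own statement) =====
-- stated objective: idiomatic
-- what changed: A builds the index incrementally in one forward pass over every character, mutating a dict of sets; B first deduplicates the concatenated characters (dict.fromkeys) and builds the result as a dict comprehension that, per distinct character, scans the rucksacks with a membership test.
import Mathlib
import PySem

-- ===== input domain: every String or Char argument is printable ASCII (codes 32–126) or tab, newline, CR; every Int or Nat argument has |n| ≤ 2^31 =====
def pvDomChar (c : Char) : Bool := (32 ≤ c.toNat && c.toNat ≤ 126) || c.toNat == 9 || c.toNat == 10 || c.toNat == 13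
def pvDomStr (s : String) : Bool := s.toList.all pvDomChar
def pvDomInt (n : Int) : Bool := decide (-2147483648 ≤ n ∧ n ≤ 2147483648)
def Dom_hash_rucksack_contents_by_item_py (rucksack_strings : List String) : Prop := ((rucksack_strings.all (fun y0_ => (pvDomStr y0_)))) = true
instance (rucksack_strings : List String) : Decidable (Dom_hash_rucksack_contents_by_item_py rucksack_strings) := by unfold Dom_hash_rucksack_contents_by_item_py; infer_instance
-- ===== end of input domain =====

-- B replaces A's single incremental dict-building pass by a dict comprehension over the
-- deduplicated characters, scanning the rucksacks once per distinct character (idiomatic; not faster).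

-- ===== PORT A =====
-- body of A's inner loop: 'if char not in mapping: mapping[char] = set()' then 'mapping[char].add(i)'
def pvStepA (n : Int) (m : PySem.Dict String (PySem.Set Int)) (ch : Char) : PySem.Dict String (PySem.Set Int) :=
  let key := String.ofList [ch]
  let m1 := if m.contains key then m else m.insert key PySem.Set.empty
  m1.insert key (PySem.Set.add (m1.getD key PySem.Set.empty) n)

def hash_rucksack_contents_by_item_py (rucksack_strings : List String) : List (String × List Int) :=
  ((PySem.List.enumerate rucksack_strings 0).foldl
      (fun m p => p.2.toList.foldl (pvStepA p.1) m)
      PySem.Dict.empty).items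

-- ===== PORT B =====
-- {i for i, s in enumerate(rucksack_strings) if c in s} — a set built left to right
-- ('c in s' for the single character c is exactly membership of c in s's characters)
def pvIndicesB (rucksack_strings : List String) (c : Char) : PySem.Set Int :=
  (PySem.List.enumerate rucksack_strings 0).foldl
    (fun acc p => if PySem.Str.isIn (String.ofList [c]) p.2 then PySem.Set.add acc p.1 else acc)
    PySem.Set.empty

-- dict.fromkeys over the joined string = PySem.List.dedup; the keys are pairwise distinct,
-- so the dict comprehension's items are exactly this map, in that key order
def hash_rucksack_contents_by_item_py_alt (rucksack_strings : List String) : List (String × List Int) :=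
  (PySem.List.dedup (rucksack_strings.foldl (fun acc s => acc ++ s.toList) ([] : List Char))).map
    (fun c => (String.ofList [c], pvIndicesB rucksack_strings c))

-- ===== PRECONDITION & SPEC =====
def Spec_hash_rucksack_contents_by_item_py (rucksack_strings : List String) (out : List (String × List Int)) : Prop := out = hash_rucksack_contents_by_item_py_alt rucksack_strings
instance (rucksack_strings : List String) (out : List (String × List Int)) : Decidable (Spec_hash_rucksack_contents_by_item_py rucksack_strings out) := by unfold Spec_hash_rucksack_contents_by_item_py; infer_instance

-- ===== CLAIM (what is proved, stated in full; the proofs are below) =====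
def Claim_equal_hash_rucksack_contents_by_item_py : Prop := ∀ (rucksack_strings : List String), Dom_hash_rucksack_contents_by_item_py rucksack_strings → Spec_hash_rucksack_contents_by_item_py rucksack_strings (hash_rucksack_contents_by_item_py rucksack_strings)

-- ===== LEMMAS AND PROOFS =====

lemma pv_key_inj {c c' : Char} (h : String.ofList [c] = String.ofList [c']) : c = c' := by
  have := congrArg String.toList h
  simpa using this

-- effect of A's per-character step on a single lookup
lemma pv_getD_stepA (n : Int) (m : PySem.Dict String (PySem.Set Int)) (ch c : Char) :
    (pvStepA n m ch).getD (String.ofList [c]) [] =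
      if c = ch then PySem.Set.add (m.getD (String.ofList [c]) []) n
      else m.getD (String.ofList [c]) [] := by
  unfold pvStepA
  by_cases hc : c = ch
  · subst hc
    by_cases h : m.contains (String.ofList [c])
    · simp [h, PySem.Dict.getD_insert_self]
    · simp [h, PySem.Dict.getD_insert_self,
        PySem.Dict.getD_of_not_contains m ([] : List Int) (by simpa using h), PySem.Set.empty]
  · have hne : String.ofList [c] ≠ String.ofList [ch] := fun h => hc (pv_key_inj h)
    by_cases h : m.contains (String.ofList [ch]) <;>
      simp [h, hc, PySem.Dict.getD_insert_of_ne _ _ _ hne]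

-- effect of A's inner loop (over the characters of one string) on a single lookup
lemma pv_getD_inner (n : Int) (c : Char) (cs : List Char) :
    ∀ m : PySem.Dict String (PySem.Set Int),
    (cs.foldl (pvStepA n) m).getD (String.ofList [c]) [] =
      if c ∈ cs then PySem.Set.add (m.getD (String.ofList [c]) []) n
      else m.getD (String.ofList [c]) [] := by
  induction cs with
  | nil => simp
  | cons x t ih =>
    intro m
    simp only [List.foldl_cons, ih, pv_getD_stepA, List.mem_cons]
    by_cases hx : c = x
    · subst hx
      by_cases ht : c ∈ t
      · simp [ht]
      · simp [ht]
    · by_cases ht : c ∈ t <;> simp [hx, ht]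

-- effect of A's outer loop on a single lookup: it is B's per-character fold
lemma pv_getD_outer (c : Char) (rs : List String) :
    ∀ (s0 : Int) (m : PySem.Dict String (PySem.Set Int)),
    ((PySem.List.enumerate rs s0).foldl (fun m p => p.2.toList.foldl (pvStepA p.1) m) m).getD
        (String.ofList [c]) [] =
      (PySem.List.enumerate rs s0).foldl
        (fun acc p => if PySem.Str.isIn (String.ofList [c]) p.2 then PySem.Set.add acc p.1 else acc)
        (m.getD (String.ofList [c]) []) := by
  induction rs with
  | nil => simp [PySem.List.enumerate]
  | cons s t ih =>
    intro s0 m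
    rw [PySem.List.enumerate_cons]
    simp only [List.foldl_cons, ih, pv_getD_inner]
    have hin : PySem.Str.isIn (String.ofList [c]) s = true ↔ c ∈ s.toList := by
      rw [PySem.Str.isIn_iff_infix]
      simp only [String.toList_ofList]
      exact List.singleton_infix_iff c s.toList
    by_cases hc : c ∈ s.toList
    · rw [if_pos hc, if_pos (hin.mpr hc)]
    · rw [if_neg hc, if_neg (fun h => hc (hin.mp h))]

-- effect of A's per-character step on the key list
lemma pv_keys_stepA (n : Int) (m : PySem.Dict String (PySem.Set Int)) (ch : Char) :
    (pvStepA n m ch).keys = PySem.Set.add m.keys (String.ofList [ch]) := by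
  unfold pvStepA
  by_cases h : m.contains (String.ofList [ch])
  · have hmem : String.ofList [ch] ∈ m.keys := (PySem.Dict.contains_iff_mem_keys _ _).mp h
    simp [h, PySem.Dict.keys_insert_of_contains _ _ h, PySem.Set.add_of_mem hmem]
  · have h' : m.contains (String.ofList [ch]) = false := by simpa using h
    have hmem : String.ofList [ch] ∉ m.keys := fun hx =>
      absurd ((PySem.Dict.contains_iff_mem_keys m (String.ofList [ch])).mpr hx) h
    have h2 : (m.insert (String.ofList [ch]) PySem.Set.empty).contains (String.ofList [ch]) = true := by
      rw [PySem.Dict.contains_iff_mem_keys, PySem.Dict.keys_insert_of_not_contains _ _ h']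
      simp
    have h3 : ∀ v : PySem.Set Int,
        ((m.insert (String.ofList [ch]) ([] : PySem.Set Int)).insert (String.ofList [ch]) v).keys
          = (m.insert (String.ofList [ch]) ([] : PySem.Set Int)).keys :=
      fun v => PySem.Dict.keys_insert_of_contains _ v h2
    simp [h', h3, PySem.Dict.keys_insert_of_not_contains _ _ h', PySem.Set.add_of_not_mem hmem]

-- A's inner loop appends the fresh keys of one string, in first-occurrence order
lemma pv_keys_inner (n : Int) (cs : List Char) :
    ∀ m : PySem.Dict String (PySem.Set Int),
    (cs.foldl (pvStepA n) m).keys =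
      (cs.map (fun ch => String.ofList [ch])).foldl PySem.Set.add m.keys := by
  induction cs with
  | nil => intro m; rfl
  | cons x t ih => intro m; simp [ih, pv_keys_stepA]

-- A's outer loop: the keys are the Set.add-fold of all characters, joined in order
lemma pv_keys_outer (rs : List String) :
    ∀ (s0 : Int) (m : PySem.Dict String (PySem.Set Int)),
    ((PySem.List.enumerate rs s0).foldl (fun m p => p.2.toList.foldl (pvStepA p.1) m) m).keys =
      (((rs.map String.toList).flatten).map (fun ch => String.ofList [ch])).foldl
        PySem.Set.add m.keys := by
  induction rs with
  | nil => simp [PySem.List.enumerate]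
  | cons s t ih =>
    intro s0 m
    rw [PySem.List.enumerate_cons]
    simp [List.foldl_cons, ih, pv_keys_inner, List.foldl_append]

-- a Set.add-fold commutes with mapping an injective function over list and accumulator
lemma pv_foldl_add_map (f : Char → String) (hf : ∀ a b, f a = f b → a = b) (xs : List Char) :
    ∀ s : List Char, (xs.map f).foldl PySem.Set.add (s.map f) = (xs.foldl PySem.Set.add s).map f := by
  induction xs with
  | nil => intro s; rfl
  | cons x t ih =>
    intro s
    have hmem : f x ∈ s.map f ↔ x ∈ s := by
      constructor
      · intro h
        obtain ⟨a, ha, hfa⟩ := List.mem_map.mp h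
        exact (hf a x hfa) ▸ ha
      · intro h; exact List.mem_map.mpr ⟨x, h, rfl⟩
    by_cases hx : x ∈ s
    · simp only [List.map_cons, List.foldl_cons,
        PySem.Set.add_of_mem (hmem.mpr hx), PySem.Set.add_of_mem hx, ih]
    · simp only [List.map_cons, List.foldl_cons,
        PySem.Set.add_of_not_mem (fun h => hx (hmem.mp h)), PySem.Set.add_of_not_mem hx]
      have hmx : List.map f s ++ [f x] = List.map f (s ++ [x]) := by simp
      rw [hmx]
      exact ih (s ++ [x])

lemma pv_joined_eq (rs : List String) :
    rs.foldl (fun acc s => acc ++ s.toList) ([] : List Char) = (rs.map String.toList).flatten := by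
  suffices h : ∀ acc : List Char,
      rs.foldl (fun acc s => acc ++ s.toList) acc = acc ++ (rs.map String.toList).flatten by
    simp [h []]
  induction rs with
  | nil => intro acc; simp
  | cons s t ih => intro acc; simp [ih]

-- ===== VERDICT (by name: the statement is the Claim_ definition above) =====
theorem hash_rucksack_contents_by_item_py_spec : Claim_equal_hash_rucksack_contents_by_item_py := by
  intro rs _
  show _ = _
  unfold hash_rucksack_contents_by_item_py hash_rucksack_contents_by_item_py_alt
  set d := (PySem.List.enumerate rs 0).foldl
      (fun m p => p.2.toList.foldl (pvStepA p.1) m) PySem.Dict.empty with hd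
  have hkeys : d.keys =
      (PySem.Set.ofList ((rs.map String.toList).flatten)).map (fun ch => String.ofList [ch]) := by
    rw [hd, pv_keys_outer]
    have : (PySem.Dict.empty (κ := String) (ν := PySem.Set Int)).keys = ([] : List Char).map (fun ch => String.ofList [ch]) := rfl
    rw [this, pv_foldl_add_map _ (fun a b h => pv_key_inj h)]
    rw [PySem.Set.ofList_eq_foldl]
  have hnd : d.keys.Nodup := by
    rw [hkeys]
    exact (PySem.Set.nodup_ofList _).map (fun a b h => pv_key_inj h)
  rw [PySem.Dict.items_eq_map_keys d hnd ([] : List Int), hkeys, List.map_map]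
  rw [pv_joined_eq]
  have hded : PySem.List.dedup ((rs.map String.toList).flatten) =
      PySem.Set.ofList ((rs.map String.toList).flatten) := by
    simp [PySem.List.dedup_eq_ofList]
  rw [hded]
  apply List.map_congr_left
  intro c _
  simp only [Function.comp]
  congr 1
  rw [hd, pv_getD_outer]
  rfl
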